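-- pv_equiv track=rewrite | github.com/aquacommander/CortonaV1 | embeddings/structured_text.py | _normalize_people
-- ===== SOURCE A (Python) =====
-- from typing import Iterable, List
--
-- def _normalize_people(people: Iterable[str]) -> List[str]:
--     seen = set()
--     normalized: List[str] = []
--     for person in people:
--         entry = person.strip()
--         if not entry:
--             continue
--         key = entry.lower()
--         if key in seen:
--             continue
--         seen.add(key)
--         normalized.append(entry)
--     return sorted(normalized, key=str.lower)
-- ===== SOURCE B (Python) =====
-- from typing import Iterable, List
--
-- def _normalize_people(people: Iterable[str]) -> List[str]:
--     entries = sorted((e for e in (p.strip() for p in people) if e), key=str.lower)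
--     out: List[str] = []
--     prev = None
--     for entry in entries:
--         key = entry.lower()
--         if key != prev:
--             out.append(entry)
--             prev = key
--     return out
-- ===== Notes on version B (the rewrite author's own statement) =====
-- stated objective: alternative
-- what changed: Replaces A's in-loop hash-set dedup followed by a final sort with sort-first-then-scan: stably sort the non-empty stripped entries by lowercase, then remove adjacent entries with equal lowercase in one pass (stability keeps the first-seen representative of each key).
import Mathlib
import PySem

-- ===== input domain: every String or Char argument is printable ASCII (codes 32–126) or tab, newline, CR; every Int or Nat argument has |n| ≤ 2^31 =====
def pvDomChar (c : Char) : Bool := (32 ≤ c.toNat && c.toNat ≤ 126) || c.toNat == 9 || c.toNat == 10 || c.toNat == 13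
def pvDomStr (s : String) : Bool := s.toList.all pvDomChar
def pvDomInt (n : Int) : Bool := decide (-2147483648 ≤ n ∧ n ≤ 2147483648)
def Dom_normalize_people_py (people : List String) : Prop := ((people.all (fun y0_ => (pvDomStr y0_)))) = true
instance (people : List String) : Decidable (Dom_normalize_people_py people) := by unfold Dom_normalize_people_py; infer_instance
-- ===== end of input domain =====

-- B replaces A's in-loop hash-set dedup + final sort by sort-first-then-adjacent-dedup (same output; alternative decomposition, no speed claim).

-- ===== PORT A =====
def normalize_people_py (people : List String) : List String :=
  let st := people.foldl
    (fun (st : PySem.Set String × List String) person =>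
      let entry := PySem.Str.strip person
      if entry = "" then st
      else
        let key := PySem.Str.lower entry
        if PySem.Set.contains st.1 key then st
        else (PySem.Set.add st.1 key, st.2 ++ [entry]))
    (PySem.Set.empty, [])
  PySem.List.sorted st.2 (fun s => PySem.Str.lower s)

-- ===== PORT B =====
def normalize_people_py_alt (people : List String) : List String :=
  let entries := PySem.List.sorted
    (((people.map (fun p => PySem.Str.strip p)).filter (fun e => decide (e ≠ ""))))
    (fun s => PySem.Str.lower s)
  (entries.foldl
    (fun (st : List String × Option String) entry =>
      let key := PySem.Str.lower entry
      if some key ≠ st.2 then (st.1 ++ [entry], some key) else st)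
    ([], none)).1

-- ===== PRECONDITION & SPEC =====
def Spec_normalize_people_py (people : List String) (out : List String) : Prop := out = normalize_people_py_alt people
instance (people : List String) (out : List String) : Decidable (Spec_normalize_people_py people out) := by unfold Spec_normalize_people_py; infer_instance

-- ===== CLAIM (what is proved, stated in full; the proofs are below) =====
def Claim_equal_normalize_people_py : Prop := ∀ (people : List String), Dom_normalize_people_py people → Spec_normalize_people_py people (normalize_people_py people)

-- ===== LEMMAS AND PROOFS =====

-- first-occurrence dedup with an explicit seen-key list (reference form of A's loop)
def dedK {α β : Type} [DecidableEq β] (key : α → β) (seen : List β) : List α → List α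
  | [] => []
  | e :: l => if key e ∈ seen then dedK key seen l else e :: dedK key (key e :: seen) l

-- adjacent-duplicate scan with the previous kept key (reference form of B's loop)
def scanK {α β : Type} [DecidableEq β] (key : α → β) (pk : β) : List α → List α
  | [] => []
  | z :: t => if key z = pk then scanK key pk t else z :: scanK key (key z) t

theorem dedK_congr {α β : Type} [DecidableEq β] (key : α → β) :
    ∀ (l : List α) (s s' : List β), (∀ b, b ∈ s ↔ b ∈ s') →
      dedK key s l = dedK key s' l := by
  intro l
  induction l with
  | nil => intro s s' _; rfl
  | cons e l ih =>
    intro s s' h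
    simp only [dedK]
    by_cases hm : key e ∈ s
    · rw [if_pos hm, if_pos ((h _).1 hm), ih _ _ h]
    · rw [if_neg hm, if_neg (fun hc => hm ((h _).2 hc))]
      have : ∀ b, b ∈ key e :: s ↔ b ∈ key e :: s' := by
        intro b; simp [h b]
      rw [ih _ _ this]

def stepA (st : PySem.Set String × List String) (person : String) :
    PySem.Set String × List String :=
  let entry := PySem.Str.strip person
  if entry = "" then st
  else
    let key := PySem.Str.lower entry
    if PySem.Set.contains st.1 key then st
    else (PySem.Set.add st.1 key, st.2 ++ [entry])

theorem foldA_snd :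
    ∀ (people : List String) (s : PySem.Set String) (a : List String),
      (people.foldl stepA (s, a)).2
      = a ++ dedK (fun s => PySem.Str.lower s) (s : List String)
          ((people.map (fun p => PySem.Str.strip p)).filter (fun e => decide (e ≠ ""))) := by
  intro people
  induction people with
  | nil => intro s a; simp [dedK]
  | cons p l ih =>
    intro s a
    simp only [List.foldl_cons, List.map_cons, List.filter_cons]
    by_cases he : PySem.Str.strip p = ""
    · have hstep : stepA (s, a) p = (s, a) := by simp [stepA, he]
      rw [hstep, ih]
      simp [he]
    · by_cases hc : PySem.Set.contains s (PySem.Str.lower (PySem.Str.strip p))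
      · have hmem : PySem.Str.lower (PySem.Str.strip p) ∈ (s : List String) := by
          simpa [PySem.Set.contains] using hc
        have hstep : stepA (s, a) p = (s, a) := by simp [stepA, he, hmem]
        rw [hstep, ih]
        simp [he, dedK, hmem]
      · have hmem : PySem.Str.lower (PySem.Str.strip p) ∉ (s : List String) := by
          simpa [PySem.Set.contains] using hc
        have hstep : stepA (s, a) p
            = ((s : List String) ++ [PySem.Str.lower (PySem.Str.strip p)],
               a ++ [PySem.Str.strip p]) := by
          simp [stepA, he, hmem, PySem.Set.add, PySem.Set.contains]
        have hcongr := dedK_congr (fun s => PySem.Str.lower s)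
          (List.filter (fun e => decide (e ≠ "")) (List.map (fun p => PySem.Str.strip p) l))
          ((s : List String) ++ [PySem.Str.lower (PySem.Str.strip p)])
          (PySem.Str.lower (PySem.Str.strip p) :: s)
          (by intro b; simp [List.mem_append, or_comm])
        rw [hstep, ih, hcongr]
        simp [he, dedK, hmem]

theorem mem_dedK {α β : Type} [DecidableEq α] [DecidableEq β] (key : α → β) :
    ∀ (l : List α) (seen : List β) (x : α),
      x ∈ dedK key seen l ↔
        key x ∉ seen ∧ l.find? (fun y => decide (key y = key x)) = some x := by
  intro l
  induction l with
  | nil => intro seen x; simp [dedK]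
  | cons e l ih =>
    intro seen x
    by_cases hke : key e = key x
    · have hf : (e :: l).find? (fun y => decide (key y = key x)) = some e :=
        List.find?_cons_of_pos (by simp [hke])
      rw [hf]
      simp only [dedK]
      by_cases hm : key e ∈ seen
      · rw [if_pos hm, ih]
        constructor
        · rintro ⟨hx, _⟩; exact absurd (hke ▸ hm) hx
        · rintro ⟨hx, _⟩; exact absurd (hke ▸ hm) hx
      · rw [if_neg hm]
        constructor
        · intro hx
          rcases List.mem_cons.1 hx with rfl | hx'
          · exact ⟨fun h => hm (hke ▸ h), rfl⟩
          · exact absurd (show key x ∈ key e :: seen by simp [← hke]) ((ih _ _).1 hx').1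
        · rintro ⟨_, h⟩
          exact List.mem_cons.2 (Or.inl (Option.some.inj h).symm)
    · have hf : (e :: l).find? (fun y => decide (key y = key x))
          = l.find? (fun y => decide (key y = key x)) :=
        List.find?_cons_of_neg (by simp [hke])
      rw [hf]
      simp only [dedK]
      by_cases hm : key e ∈ seen
      · rw [if_pos hm, ih]
      · rw [if_neg hm]
        constructor
        · intro hx
          rcases List.mem_cons.1 hx with rfl | hx'
          · exact absurd rfl hke
          · obtain ⟨hx1, hx2⟩ := (ih _ _).1 hx'
            exact ⟨fun h => hx1 (List.mem_cons_of_mem _ h), hx2⟩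
        · rintro ⟨hx, hfl⟩
          refine List.mem_cons.2 (Or.inr ((ih _ _).2 ⟨?_, hfl⟩))
          intro h
          rcases List.mem_cons.1 h with h' | h'
          · exact hke h'.symm
          · exact hx h'

theorem dedK_pairwise {α β : Type} [DecidableEq α] [DecidableEq β] (key : α → β) :
    ∀ (l : List α) (seen : List β),
      (dedK key seen l).Pairwise (fun a b => key a ≠ key b) := by
  intro l
  induction l with
  | nil => intro seen; simp [dedK]
  | cons e l ih =>
    intro seen
    simp only [dedK]
    by_cases hm : key e ∈ seen
    · rw [if_pos hm]; exact ih seen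
    · rw [if_neg hm]
      refine List.Pairwise.cons ?_ (ih _)
      intro b hb
      have hb1 := ((mem_dedK key l (key e :: seen) b).1 hb).1
      intro h; exact hb1 (by simp [h])

theorem mem_scanK {α β : Type} [DecidableEq α] [LinearOrder β] (key : α → β) :
    ∀ (t : List α) (pk : β) (x : α),
      t.Pairwise (fun a b => key a ≤ key b) →
      (∀ z ∈ t, pk ≤ key z) →
      (x ∈ scanK key pk t ↔
        key x ≠ pk ∧ t.find? (fun y => decide (key y = key x)) = some x) := by
  intro t
  induction t with
  | nil => intro pk x _ _; simp [scanK]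
  | cons z t ih =>
    intro pk x hp hb
    have hpt : t.Pairwise (fun a b => key a ≤ key b) := hp.of_cons
    have hzt : ∀ w ∈ t, key z ≤ key w := fun w hw => List.rel_of_pairwise_cons hp hw
    simp only [scanK]
    by_cases hz : key z = pk
    · rw [if_pos hz, ih pk x hpt (fun w hw => hb w (List.mem_cons_of_mem _ hw))]
      by_cases hke : key z = key x
      · have hxp : key x = pk := hke ▸ hz
        have hf : (z :: t).find? (fun y => decide (key y = key x)) = some z :=
          List.find?_cons_of_pos (by simp [hke])
        rw [hf]
        constructor
        · rintro ⟨hx, _⟩; exact absurd hxp hx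
        · rintro ⟨hx, _⟩; exact absurd hxp hx
      · have hf : (z :: t).find? (fun y => decide (key y = key x))
            = t.find? (fun y => decide (key y = key x)) :=
          List.find?_cons_of_neg (by simp [hke])
        rw [hf]
    · have hpk_lt : pk < key z := lt_of_le_of_ne (hb z (List.mem_cons_self)) (Ne.symm hz)
      rw [if_neg hz]
      by_cases hke : key z = key x
      · have hf : (z :: t).find? (fun y => decide (key y = key x)) = some z :=
          List.find?_cons_of_pos (by simp [hke])
        rw [hf]
        constructor
        · intro hx
          rcases List.mem_cons.1 hx with rfl | hx'
          · exact ⟨fun h => hz (hke.trans h), rfl⟩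
          · exact absurd hke.symm ((ih (key z) x hpt hzt).1 hx').1
        · rintro ⟨_, h⟩
          exact List.mem_cons.2 (Or.inl (Option.some.inj h).symm)
      · have hf : (z :: t).find? (fun y => decide (key y = key x))
            = t.find? (fun y => decide (key y = key x)) :=
          List.find?_cons_of_neg (by simp [hke])
        rw [hf]
        constructor
        · intro hx
          rcases List.mem_cons.1 hx with rfl | hx'
          · exact absurd rfl hke
          · obtain ⟨_, hfl⟩ := (ih (key z) x hpt hzt).1 hx'
            have hxm : x ∈ t := List.mem_of_find?_eq_some hfl
            exact ⟨(lt_of_lt_of_le hpk_lt (hzt x hxm)).ne', hfl⟩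
        · rintro ⟨_, hfl⟩
          exact List.mem_cons.2 (Or.inr ((ih (key z) x hpt hzt).2 ⟨fun h => hke h.symm, hfl⟩))

theorem scanK_pairwise {α β : Type} [DecidableEq α] [LinearOrder β] (key : α → β) :
    ∀ (t : List α) (pk : β),
      t.Pairwise (fun a b => key a ≤ key b) →
      (∀ z ∈ t, pk ≤ key z) →
      (scanK key pk t).Pairwise (fun a b => key a < key b) ∧
        (∀ w ∈ scanK key pk t, pk < key w) := by
  intro t
  induction t with
  | nil => intro pk _ _; simp [scanK]
  | cons z t ih =>
    intro pk hp hb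
    have hpt : t.Pairwise (fun a b => key a ≤ key b) := hp.of_cons
    have hzt : ∀ w ∈ t, key z ≤ key w := fun w hw => List.rel_of_pairwise_cons hp hw
    simp only [scanK]
    by_cases hz : key z = pk
    · rw [if_pos hz]
      exact ih pk hpt (fun w hw => hb w (List.mem_cons_of_mem _ hw))
    · rw [if_neg hz]
      have hpk_lt : pk < key z := lt_of_le_of_ne (hb z (List.mem_cons_self)) (Ne.symm hz)
      obtain ⟨hpw, hlt⟩ := ih (key z) hpt hzt
      refine ⟨List.Pairwise.cons (fun b hb' => hlt b hb') hpw, ?_⟩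
      intro w hw
      rcases List.mem_cons.1 hw with rfl | hw'
      · exact hpk_lt
      · exact lt_trans hpk_lt (hlt w hw')
theorem foldB_fst {α β : Type} [DecidableEq β] (key : α → β) :
    ∀ (t : List α) (out : List α) (pk : β),
      (t.foldl
        (fun (st : List α × Option β) entry =>
          let k := key entry
          if some k ≠ st.2 then (st.1 ++ [entry], some k) else st)
        (out, some pk)).1
      = out ++ scanK key pk t := by
  intro t
  induction t with
  | nil => intro out pk; simp [scanK]
  | cons e t ih =>
    intro out pk
    rw [List.foldl_cons]
    by_cases hk : key e = pk
    · have hstep : (let k := key e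
          if some k ≠ ((out, some pk) : List α × Option β).2
          then ((out, some pk).1 ++ [e], some k) else ((out, some pk) : List α × Option β))
          = ((out, some pk) : List α × Option β) := by simp [hk]
      rw [hstep, ih]
      simp [scanK, hk]
    · have hstep : (let k := key e
          if some k ≠ ((out, some pk) : List α × Option β).2
          then ((out, some pk).1 ++ [e], some k) else ((out, some pk) : List α × Option β))
          = ((out ++ [e], some (key e)) : List α × Option β) := by simp [hk]
      rw [hstep, ih]
      simp [scanK, hk, List.append_assoc]

theorem insertBy_pairwise {α β : Type} [LinearOrder β] (key : α → β) :
    ∀ (acc : List α) (x : α),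
      acc.Pairwise (fun a b => key a ≤ key b) →
      (PySem.List.insertBy (fun a b => decide (key a < key b)) x acc).Pairwise
        (fun a b => key a ≤ key b) := by
  intro acc
  induction acc with
  | nil => intro x _; simp [PySem.List.insertBy]
  | cons y ys ih =>
    intro x hp
    have hpt : ys.Pairwise (fun a b => key a ≤ key b) := hp.of_cons
    have hyt : ∀ w ∈ ys, key y ≤ key w := fun w hw => List.rel_of_pairwise_cons hp hw
    simp only [PySem.List.insertBy]
    by_cases hlt : key x < key y
    · rw [if_pos (by simpa using hlt)]
      refine List.Pairwise.cons ?_ hp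
      intro b hb
      rcases List.mem_cons.1 hb with rfl | hb'
      · exact le_of_lt hlt
      · exact le_trans (le_of_lt hlt) (hyt b hb')
    · rw [if_neg (by simpa using hlt)]
      refine List.Pairwise.cons ?_ (ih x hpt)
      intro b hb
      rcases (PySem.List.mem_insertBy _ _ _ _).1 hb with rfl | hb'
      · exact le_of_not_gt hlt
      · exact hyt b hb'

theorem insertBy_filter {α β : Type} [LinearOrder β] [DecidableEq β] (key : α → β) (c : β) :
    ∀ (acc : List α) (x : α),
      acc.Pairwise (fun a b => key a ≤ key b) →
      (PySem.List.insertBy (fun a b => decide (key a < key b)) x acc).filter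
          (fun y => decide (key y = c))
        = acc.filter (fun y => decide (key y = c))
          ++ (if key x = c then [x] else []) := by
  intro acc
  induction acc with
  | nil =>
    intro x _
    simp only [PySem.List.insertBy, List.nil_append, List.filter]
    by_cases hxc : key x = c <;> simp [hxc]
  | cons y ys ih =>
    intro x hp
    have hpt : ys.Pairwise (fun a b => key a ≤ key b) := hp.of_cons
    have hyt : ∀ w ∈ ys, key y ≤ key w := fun w hw => List.rel_of_pairwise_cons hp hw
    simp only [PySem.List.insertBy]
    by_cases hlt : key x < key y
    · rw [if_pos (by simpa using hlt)]
      by_cases hxc : key x = c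
      · have hnone : ∀ w ∈ y :: ys, ¬ (key w = c) := by
          intro w hw h
          have hxw : key x < key w := by
            rcases List.mem_cons.1 hw with rfl | hw'
            · exact hlt
            · exact lt_of_lt_of_le hlt (hyt w hw')
          rw [hxc, h] at hxw
          exact lt_irrefl _ hxw
        have h1 : (y :: ys).filter (fun y => decide (key y = c)) = [] :=
          List.filter_eq_nil_iff.2 (by intro w hw; simpa using hnone w hw)
        simp [hxc, h1]
      · have h3 : (x :: y :: ys).filter (fun y => decide (key y = c))
            = (y :: ys).filter (fun y => decide (key y = c)) := by
          simp [List.filter_cons, hxc]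
        rw [h3]
        simp [hxc]
    · rw [if_neg (by simpa using hlt)]
      simp only [List.filter_cons]
      rw [ih x hpt]
      by_cases hyc : key y = c <;> simp [hyc]

theorem foldl_insertBy_filter {α β : Type} [LinearOrder β] [DecidableEq β] (key : α → β) (c : β) :
    ∀ (l : List α) (acc : List α),
      acc.Pairwise (fun a b => key a ≤ key b) →
      (l.foldl (fun acc x => PySem.List.insertBy (fun a b => decide (key a < key b)) x acc) acc).filter
          (fun y => decide (key y = c))
        = acc.filter (fun y => decide (key y = c)) ++ l.filter (fun y => decide (key y = c)) := by
  intro l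
  induction l with
  | nil => intro acc _; simp
  | cons x l ih =>
    intro acc hp
    simp only [List.foldl_cons, List.filter_cons]
    rw [ih _ (insertBy_pairwise key acc x hp), insertBy_filter key c acc x hp]
    by_cases hxc : key x = c <;> simp [hxc]

theorem sorted_filter_stable {α β : Type} [LinearOrder β] [DecidableEq β] (key : α → β) (c : β)
    (l : List α) :
    (PySem.List.sorted l key).filter (fun y => decide (key y = c))
      = l.filter (fun y => decide (key y = c)) := by
  rw [PySem.List.sorted_eq_foldl_insertBy]
  simpa using foldl_insertBy_filter key c l [] (by simp)

theorem find?_eq_head?_filter {α : Type} (p : α → Bool) :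
    ∀ (l : List α), l.find? p = (l.filter p).head? := by
  intro l
  induction l with
  | nil => rfl
  | cons x l ih =>
    cases hx : p x
    · rw [List.find?_cons_of_neg (by simp [hx]), ih, List.filter_cons, hx]
      simp
    · rw [List.find?_cons_of_pos hx, List.filter_cons, hx]
      simp

theorem sorted_find?_stable {α β : Type} [LinearOrder β] [DecidableEq β] (key : α → β) (c : β)
    (l : List α) :
    (PySem.List.sorted l key).find? (fun y => decide (key y = c))
      = l.find? (fun y => decide (key y = c)) := by
  rw [find?_eq_head?_filter, find?_eq_head?_filter, sorted_filter_stable]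

def dedupAdj {α β : Type} [DecidableEq β] (key : α → β) : List α → List α
  | [] => []
  | y :: t => y :: scanK key (key y) t

theorem mem_dedupAdj {α β : Type} [DecidableEq α] [LinearOrder β] (key : α → β)
    (ys : List α) (hp : ys.Pairwise (fun a b => key a ≤ key b)) (x : α) :
    x ∈ dedupAdj key ys ↔ ys.find? (fun y => decide (key y = key x)) = some x := by
  cases ys with
  | nil => simp [dedupAdj]
  | cons y t =>
    have hpt : t.Pairwise (fun a b => key a ≤ key b) := hp.of_cons
    have hyt : ∀ w ∈ t, key y ≤ key w := fun w hw => List.rel_of_pairwise_cons hp hw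
    simp only [dedupAdj]
    by_cases hke : key y = key x
    · have hf : (y :: t).find? (fun z => decide (key z = key x)) = some y :=
        List.find?_cons_of_pos (by simp [hke])
      rw [hf]
      constructor
      · intro hx
        rcases List.mem_cons.1 hx with rfl | hx'
        · rfl
        · exact absurd hke.symm ((mem_scanK key t (key y) x hpt hyt).1 hx').1
      · intro h
        exact List.mem_cons.2 (Or.inl (Option.some.inj h).symm)
    · have hf : (y :: t).find? (fun z => decide (key z = key x))
          = t.find? (fun z => decide (key z = key x)) :=
        List.find?_cons_of_neg (by simp [hke])
      rw [hf]
      constructor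
      · intro hx
        rcases List.mem_cons.1 hx with rfl | hx'
        · exact absurd rfl hke
        · exact ((mem_scanK key t (key y) x hpt hyt).1 hx').2
      · intro hfl
        exact List.mem_cons.2
          (Or.inr ((mem_scanK key t (key y) x hpt hyt).2 ⟨fun h => hke h.symm, hfl⟩))

theorem dedupAdj_pairwise {α β : Type} [DecidableEq α] [LinearOrder β] (key : α → β)
    (ys : List α) (hp : ys.Pairwise (fun a b => key a ≤ key b)) :
    (dedupAdj key ys).Pairwise (fun a b => key a < key b) := by
  cases ys with
  | nil => simp [dedupAdj]
  | cons y t =>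
    have hpt : t.Pairwise (fun a b => key a ≤ key b) := hp.of_cons
    have hyt : ∀ w ∈ t, key y ≤ key w := fun w hw => List.rel_of_pairwise_cons hp hw
    obtain ⟨hpw, hlt⟩ := scanK_pairwise key t (key y) hpt hyt
    exact List.Pairwise.cons (fun b hb => hlt b hb) hpw

theorem nodup_of_pairwise_key_ne {α β : Type} (key : α → β) (l : List α)
    (h : l.Pairwise (fun a b => key a ≠ key b)) : l.Nodup :=
  h.imp (fun hab => fun he => hab (he ▸ rfl))

theorem foldB_top {α β : Type} [DecidableEq β] (key : α → β) (t : List α) :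
    (t.foldl
      (fun (st : List α × Option β) entry =>
        let k := key entry
        if some k ≠ st.2 then (st.1 ++ [entry], some k) else st)
      ([], none)).1 = dedupAdj key t := by
  cases t with
  | nil => rfl
  | cons y t =>
    rw [List.foldl_cons]
    have hstep : (let k := key y
        if some k ≠ (([], none) : List α × Option β).2
        then ((([], none) : List α × Option β).1 ++ [y], some k)
        else (([], none) : List α × Option β))
        = (([y], some (key y)) : List α × Option β) := by simp
    rw [hstep, foldB_fst key t [y] (key y)]
    rfl

theorem sorted_dedK_eq_dedupAdj_sorted {α β : Type} [DecidableEq α] [LinearOrder β]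
    (key : α → β) (entries : List α) :
    PySem.List.sorted (dedK key [] entries) key
      = dedupAdj key (PySem.List.sorted entries key) := by
  have hpys : (PySem.List.sorted entries key).Pairwise (fun a b => key a ≤ key b) :=
    PySem.List.sorted_pairwise entries key
  have hmem : ∀ x, x ∈ dedupAdj key (PySem.List.sorted entries key) ↔ x ∈ dedK key [] entries := by
    intro x
    rw [mem_dedupAdj key _ hpys x, mem_dedK key entries [] x,
      sorted_find?_stable key (key x) entries]
    simp
  have hnd1 : (dedupAdj key (PySem.List.sorted entries key)).Nodup :=
    nodup_of_pairwise_key_ne key _ ((dedupAdj_pairwise key _ hpys).imp (fun h => ne_of_lt h))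
  have hnd2 : (dedK key [] entries).Nodup :=
    nodup_of_pairwise_key_ne key _ (dedK_pairwise key entries [])
  have hperm : (dedupAdj key (PySem.List.sorted entries key)).Perm (dedK key [] entries) :=
    (List.perm_ext_iff_of_nodup hnd1 hnd2).2 hmem
  exact PySem.List.sorted_eq_of_perm_of_pairwise_lt _ _ key hperm (dedupAdj_pairwise key _ hpys)

theorem normalize_people_py_spec : Claim_equal_normalize_people_py := by
  intro people _
  unfold Spec_normalize_people_py
  have hA : normalize_people_py people
      = PySem.List.sorted
          (dedK (fun s => PySem.Str.lower s) []
            ((people.map (fun p => PySem.Str.strip p)).filter (fun e => decide (e ≠ ""))))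
          (fun s => PySem.Str.lower s) := by
    have h := foldA_snd people PySem.Set.empty []
    rw [List.nil_append] at h
    exact congrArg (fun l => PySem.List.sorted l (fun s => PySem.Str.lower s)) h
  have hB : normalize_people_py_alt people
      = dedupAdj (fun s => PySem.Str.lower s)
          (PySem.List.sorted
            ((people.map (fun p => PySem.Str.strip p)).filter (fun e => decide (e ≠ "")))
            (fun s => PySem.Str.lower s)) :=
    foldB_top (fun s => PySem.Str.lower s) _
  rw [hA, hB]
  exact sorted_dedK_eq_dedupAdj_sorted _ _
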